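-- pv_equiv track=rewrite | github.com/lucaspfdr/HackerRankProblems | PPPOOOO.py | countQualifiedPlayers
-- ===== SOURCE A (Python) =====
-- def countQualifiedPlayers(max_rank, player_scores):
--     # Ordena as pontuações em ordem decrescente
--     player_scores.sort(reverse=True)
--
--     qualified_count = 0
--     current_rank = 1
--     previous_score = -1
--
--     for score in player_scores:
--         if score == 0:
--             break  # Ignora pontuações zero
--
--         if score != previous_score:
--             current_rank = qualified_count + 1  # Atualiza o ranking quando a pontuação muda
--
--         if current_rank > max_rank:
--             break  # Para se o ranking exceder o limite `max_rank`
--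
--         qualified_count += 1
--         previous_score = score
--
--     return qualified_count
-- ===== SOURCE B (Python) =====
-- def countQualifiedPlayers(max_rank, player_scores):
--     # Same in-place descending sort as the original (argument mutation preserved).
--     player_scores.sort(reverse=True)
--     qualified_count = 0
--     i = 0
--     n = len(player_scores)
--     while i < n:
--         score = player_scores[i]
--         if score == 0 or qualified_count + 1 > max_rank:
--             break
--         j = i
--         while j < n and player_scores[j] == score:
--             j += 1
--         qualified_count += j - i  # whole tied group shares one rank
--         i = j
--     return qualified_count
-- ===== Notes on version B (the rewrite author's own statement) =====
-- stated objective: alternative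
-- what changed: Replaces the element-by-element loop with previous_score/current_rank bookkeeping by a group-at-a-time scan: an index jumps over each maximal run of equal scores, the run's rank is qualified_count+1, and the whole run is counted or the loop stops.
import Mathlib
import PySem

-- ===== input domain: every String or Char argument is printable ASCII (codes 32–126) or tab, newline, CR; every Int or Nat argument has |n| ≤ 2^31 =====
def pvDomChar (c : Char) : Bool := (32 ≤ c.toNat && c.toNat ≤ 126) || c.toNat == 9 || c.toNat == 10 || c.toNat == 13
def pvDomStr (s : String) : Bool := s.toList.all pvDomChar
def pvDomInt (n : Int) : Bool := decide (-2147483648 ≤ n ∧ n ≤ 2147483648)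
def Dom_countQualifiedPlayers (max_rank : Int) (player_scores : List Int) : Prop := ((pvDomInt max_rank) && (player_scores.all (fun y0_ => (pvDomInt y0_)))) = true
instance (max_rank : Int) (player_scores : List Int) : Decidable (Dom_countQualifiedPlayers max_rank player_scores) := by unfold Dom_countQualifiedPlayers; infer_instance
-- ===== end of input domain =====

-- B replaces the per-element previous_score/current_rank bookkeeping by a group-at-a-time
-- scan over maximal runs of equal scores (alternative decomposition, same cost).
-- Both versions sort the argument in place; the equivalence proved is about the return value.


-- ===== PORT A =====
-- A's for-loop with break, state (qualified_count, current_rank, previous_score)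
def pvALoop (max_rank : Int) : List Int → Int → Int → Int → Int
  | [], c, _, _ => c
  | s :: t, c, r, p =>
    if s = 0 then c
    else
      let r' := if s ≠ p then c + 1 else r
      if r' > max_rank then c
      else pvALoop max_rank t (c + 1) r' s

def countQualifiedPlayers (max_rank : Int) (player_scores : List Int) : Int :=
  pvALoop max_rank (PySem.List.sorted player_scores (fun x => x) true) 0 1 (-1)

-- ===== PORT B =====
-- B's while-loop: jump over one maximal run of equal scores at a time
def pvBLoop (max_rank : Int) : List Int → Int → Int
  | [], c => c
  | s :: t, c =>
    if s = 0 ∨ c + 1 > max_rank then c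
    else pvBLoop max_rank ((s :: t).dropWhile (· == s))
           (c + (((s :: t).takeWhile (· == s)).length : Int))
  termination_by xs _ => xs.length
  decreasing_by
    simp only [List.dropWhile_cons, BEq.rfl, if_pos]
    exact Nat.lt_succ_of_le (List.length_dropWhile_le _ _)

def countQualifiedPlayers_alt (max_rank : Int) (player_scores : List Int) : Int :=
  pvBLoop max_rank (PySem.List.sorted player_scores (fun x => x) true) 0

-- ===== PRECONDITION & SPEC =====
def Spec_countQualifiedPlayers (max_rank : Int) (player_scores : List Int) (out : Int) : Prop := out = countQualifiedPlayers_alt max_rank player_scores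
instance (max_rank : Int) (player_scores : List Int) (out : Int) : Decidable (Spec_countQualifiedPlayers max_rank player_scores out) := by unfold Spec_countQualifiedPlayers; infer_instance

-- ===== CLAIM (what is proved, stated in full; the proofs are below) =====
def Claim_equal_countQualifiedPlayers : Prop := ∀ (max_rank : Int) (player_scores : List Int), Dom_countQualifiedPlayers max_rank player_scores → Spec_countQualifiedPlayers max_rank player_scores (countQualifiedPlayers max_rank player_scores)

-- ===== LEMMAS AND PROOFS =====

-- Within a run of elements equal to the previous score s (s ≠ 0, rank within bound),
-- A's loop just counts the run: skipping the run at once is the same.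
lemma pvALoop_run (M s r : Int) (hs : s ≠ 0) (hr : ¬ r > M) :
    ∀ xs c, pvALoop M xs c r s
      = pvALoop M (xs.dropWhile (· == s)) (c + ((xs.takeWhile (· == s)).length : Int)) r s := by
  intro xs
  induction xs with
  | nil => intro c; simp [pvALoop]
  | cons a t ih =>
    intro c
    by_cases ha : a = s
    · subst ha
      have h1 : pvALoop M (a :: t) c r a = pvALoop M t (c + 1) r a := by
        simp [pvALoop, hs, hr]
      rw [h1, ih]
      simp only [List.dropWhile_cons, List.takeWhile_cons, BEq.rfl, if_pos,
        List.length_cons]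
      congr 1
      push_cast
      ring
    · have hb : (a == s) = false := by simp [ha]
      simp [hb]

lemma pvLoop_eq (M : Int) : ∀ (n : Nat) (xs : List Int) (c r p : Int),
    xs.length ≤ n → (r = c + 1 ∨ xs.head? ≠ some p) →
    pvALoop M xs c r p = pvBLoop M xs c := by
  intro n
  induction n with
  | zero =>
    intro xs c r p hlen _
    have : xs = [] := List.eq_nil_of_length_eq_zero (Nat.le_zero.mp hlen)
    subst this; simp [pvALoop, pvBLoop]
  | succ n ih =>
    intro xs c r p hlen H
    cases xs with
    | nil => simp [pvALoop, pvBLoop]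
    | cons s t =>
      by_cases hs : s = 0
      · subst hs; simp [pvALoop, pvBLoop]
      · have hr' : (if s ≠ p then c + 1 else r) = c + 1 := by
          by_cases hsp : s = p
          · subst hsp
            rcases H with h | h
            · simp [h]
            · exact absurd rfl h
          · simp [hsp]
        by_cases hm : c + 1 > M
        · rw [show pvALoop M (s :: t) c r p = c by simp only [pvALoop, hr']; simp [hs, hm]]
          rw [show pvBLoop M (s :: t) c = c by rw [pvBLoop]; simp [hm]]
        · have h1 : pvALoop M (s :: t) c r p = pvALoop M t (c + 1) (c + 1) s := by
            simp only [pvALoop, hr']; simp [hs, hm]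
          rw [h1, pvALoop_run M s (c + 1) hs hm]
          have hd : (t.dropWhile (· == s)).head? ≠ some s := by
            intro hcon
            have := List.head?_dropWhile_not (· == s) t
            rw [hcon] at this
            simp at this
          have hlen2 : (t.dropWhile (· == s)).length ≤ n := by
            have := List.length_dropWhile_le (· == s) t
            simp at hlen
            omega
          rw [ih _ _ _ _ hlen2 (Or.inr hd)]
          rw [show pvBLoop M (s :: t) c
              = pvBLoop M ((s :: t).dropWhile (· == s))
                  (c + (((s :: t).takeWhile (· == s)).length : Int)) by
            rw [pvBLoop]; simp [hs, hm]]
          simp only [List.dropWhile_cons, List.takeWhile_cons, BEq.rfl, if_pos,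
            List.length_cons]
          congr 1
          push_cast
          ring

-- ===== VERDICT (by name: the statement is the Claim_ definition above) =====
theorem countQualifiedPlayers_spec : Claim_equal_countQualifiedPlayers := by
  intro M xs _
  unfold Spec_countQualifiedPlayers countQualifiedPlayers countQualifiedPlayers_alt
  exact pvLoop_eq M _ _ 0 1 (-1) le_rfl (Or.inl rfl)
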